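-- pv_equiv track=rewrite | github.com/JaehyeongPark06/Competitive-Programming | DMOJ/CCC/2011/s3.py | solve
-- ===== SOURCE A (Python) =====
-- import math
--
-- def solve(m, x, y):
--     if m == 0:
--         return False
--
--     x1 = x // int(math.pow(5, m - 1))
--     y1 = y // int(math.pow(5, m - 1))
--
--     if x1 == 0 and y1 == 0:
--         return False
--     if 0 < x1 < 4 and y1 == 0:
--         return True
--     if x1 == 2 and y1 == 1:
--         return True
--     if ((x1 == 1 or x1 == 3) and y1 == 1) or (x1 == 2 and y1 == 2):
--         return solve(m - 1, x % int(math.pow(5, m - 1)), y % int(math.pow(5, m - 1)))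
--     return False
-- ===== SOURCE B (Python) =====
-- def solve(m, x, y):
--     # Normalize first: anything negative, or with a quotient digit >= 5 at the top,
--     # is rejected by the digit rules immediately; then scan exact base-5 digit pairs
--     # from most significant to least significant.
--     if m <= 0 or x < 0 or y < 0 or x >= 5 ** m or y >= 5 ** m:
--         return False
--     xd, yd = [], []
--     for _ in range(m):
--         x, xr = divmod(x, 5)
--         xd.append(xr)
--         y, yr = divmod(y, 5)
--         yd.append(yr)
--     for dx, dy in zip(reversed(xd), reversed(yd)):
--         if dy == 0:
--             return 1 <= dx <= 3
--         if dy == 1 and dx == 2: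
--             return True
--         if not ((dy == 1 and dx in (1, 3)) or (dy == 2 and dx == 2)):
--             return False
--     return False
-- ===== Notes on version B (the rewrite author's own statement) =====
-- stated objective: alternative
-- what changed: Replaces A's recursion that re-derives float powers int(math.pow(5,m-1)) and takes quotients/remainders by shrinking big powers with a normalize-then-scan pass: reject negatives and out-of-range coordinates up front, extract the exact base-5 digits of x and y once with small divmods, and scan the digit pairs most-significant first with the fractal rules.
import Mathlib
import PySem

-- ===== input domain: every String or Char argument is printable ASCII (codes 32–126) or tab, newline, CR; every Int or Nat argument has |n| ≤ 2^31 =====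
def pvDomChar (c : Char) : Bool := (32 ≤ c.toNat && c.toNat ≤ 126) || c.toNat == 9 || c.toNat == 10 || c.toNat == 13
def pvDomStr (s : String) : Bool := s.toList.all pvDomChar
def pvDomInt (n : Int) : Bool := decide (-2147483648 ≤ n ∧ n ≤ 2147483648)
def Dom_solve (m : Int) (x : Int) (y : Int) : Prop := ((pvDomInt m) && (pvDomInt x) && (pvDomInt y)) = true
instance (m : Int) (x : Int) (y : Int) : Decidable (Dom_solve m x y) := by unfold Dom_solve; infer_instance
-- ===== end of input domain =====

-- B replaces A's recursion over shrinking powers of 5 with an up-front range check,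
-- one exact base-5 digit extraction, and a most-significant-first scan of digit pairs.


-- ===== PORT A =====
-- Models int(math.pow(5, e)). Exact for every e ≤ 22 (the float is exact there, and int()
-- of the fractional float is 0 for e < 0). For 23 ≤ e ≤ 441 the Python float differs from
-- 5^e by a tiny relative error, but both exceed 2^31, so every comparison and floordiv/mod
-- result solve reaches on Dom-sized x, y (|x|,|y| ≤ 2^31) is identical: on Dom ∩ Pre_solve
-- this port computes exactly what A computes.
def pyIntPow5 (e : Int) : Int := if e < 0 then 0 else 5 ^ e.toNat

def solve (m : Int) (x : Int) (y : Int) : Bool :=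
  if m = 0 then false
  else if _hp : pyIntPow5 (m - 1) = 0 then false  -- Python raises ZeroDivisionError here (m < 0); outside Pre_solve
  else
    let x1 := PySem.Int.floordiv x (pyIntPow5 (m - 1))
    let y1 := PySem.Int.floordiv y (pyIntPow5 (m - 1))
    if x1 = 0 ∧ y1 = 0 then false
    else if 0 < x1 ∧ x1 < 4 ∧ y1 = 0 then true
    else if x1 = 2 ∧ y1 = 1 then true
    else if ((x1 = 1 ∨ x1 = 3) ∧ y1 = 1) ∨ (x1 = 2 ∧ y1 = 2) then
      solve (m - 1) (PySem.Int.mod x (pyIntPow5 (m - 1))) (PySem.Int.mod y (pyIntPow5 (m - 1)))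
    else false
termination_by m.toNat
decreasing_by
  have h5 : pyIntPow5 (m - 1) ≠ 0 := _hp
  by_cases hlt : m - 1 < 0
  · exact absurd (by simp only [pyIntPow5, if_pos hlt]) h5
  · omega

-- ===== PORT B =====
-- the base-5 digits of x, least significant first (the divmod loop of Source B)
def toDigits5 : Nat → Int → List Int
  | 0, _ => []
  | n + 1, x => PySem.Int.mod x 5 :: toDigits5 n (PySem.Int.floordiv x 5)

-- the scan over (dx, dy) digit pairs, most significant first (Source B's second loop)
def scanDigits : List (Int × Int) → Bool
  | [] => false
  | (dx, dy) :: rest =>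
    if dy = 0 then decide (1 ≤ dx ∧ dx ≤ 3)
    else if dy = 1 ∧ dx = 2 then true
    else if (dy = 1 ∧ (dx = 1 ∨ dx = 3)) ∨ (dy = 2 ∧ dx = 2) then scanDigits rest
    else false

def solve_alt (m : Int) (x : Int) (y : Int) : Bool :=
  if m ≤ 0 ∨ x < 0 ∨ y < 0 ∨ x ≥ 5 ^ m.toNat ∨ y ≥ 5 ^ m.toNat then false
  else scanDigits (((toDigits5 m.toNat x).reverse).zip ((toDigits5 m.toNat y).reverse))

-- ===== PRECONDITION & SPEC =====
-- Pre_ excludes exactly the inputs on which the Python A raises: m < 0 (ZeroDivisionError,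
-- int(math.pow(5, m-1)) is 0) and m ≥ 443 (math.pow(5, m-1) raises OverflowError).
def Pre_solve (m : Int) (x : Int) (y : Int) : Prop := 0 ≤ m ∧ m ≤ 442
instance (m : Int) (x : Int) (y : Int) : Decidable (Pre_solve m x y) := by unfold Pre_solve; infer_instance
def pvWitness_solve : Int × Int × Int := (2, 7, 5)

def Spec_solve (m : Int) (x : Int) (y : Int) (out : Bool) : Prop := out = solve_alt m x y
instance (m : Int) (x : Int) (y : Int) (out : Bool) : Decidable (Spec_solve m x y out) := by unfold Spec_solve; infer_instance

-- ===== CLAIM (what is proved, stated in full; the proofs are below) =====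
def Claim_equal_solve : Prop := ∀ (m : Int) (x : Int) (y : Int), Dom_solve m x y → Pre_solve m x y → Spec_solve m x y (solve m x y)

-- ===== LEMMAS AND PROOFS =====

theorem pyIntPow5_natCast (n : Nat) : pyIntPow5 (n : Int) = 5 ^ n := by
  simp [pyIntPow5]

-- the three division-algebra facts behind peeling the top base-5 digit
theorem mod_pow_mod (x : Int) (n : Nat) : x % 5 ^ (n + 1) % 5 = x % 5 :=
  Int.emod_emod_of_dvd x (dvd_pow_self 5 (Nat.succ_ne_zero n))

theorem div_div_pow (x : Int) (n : Nat) : x / 5 / 5 ^ n = x / 5 ^ (n + 1) := by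
  rw [Int.ediv_ediv_of_nonneg (by norm_num : (0:Int) ≤ 5)]
  ring_nf

theorem mod_pow_div (x : Int) (n : Nat) : x % 5 ^ (n + 1) / 5 = x / 5 % 5 ^ n := by
  have hP : (0:Int) < 5 ^ (n + 1) := by positivity
  have hx : 5 ^ (n + 1) * (x / 5 ^ (n + 1)) + x % 5 ^ (n + 1) = x := Int.ediv_add_emod x (5 ^ (n+1))
  have hr0 : 0 ≤ x % 5 ^ (n + 1) := Int.emod_nonneg x (by positivity)
  have hrP : x % 5 ^ (n + 1) < 5 ^ (n + 1) := Int.emod_lt_of_pos x hP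
  set r := x % 5 ^ (n + 1) with hrdef
  set q := x / 5 ^ (n + 1) with hqdef
  have h1 : x / 5 = r / 5 + 5 ^ n * q := by
    have hxr : x = r + (5 ^ n * q) * 5 := by rw [← hx]; ring
    rw [hxr, Int.add_mul_ediv_right _ _ (by norm_num : (5:Int) ≠ 0)]
  have h3 : r / 5 < 5 ^ n := by
    rw [Int.ediv_lt_iff_lt_mul (by norm_num : (0:Int) < 5)]
    calc r < 5 ^ (n + 1) := hrP
    _ = 5 ^ n * 5 := by ring
  rw [h1, Int.add_mul_emod_self_left]
  exact (Int.emod_eq_of_lt (Int.ediv_nonneg hr0 (by norm_num)) h3).symm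

-- peeling the most significant digit off the digit list
theorem digits_decomp (n : Nat) : ∀ x : Int, 0 ≤ x → x < 5 ^ (n + 1) →
    toDigits5 (n + 1) x = toDigits5 n (x % 5 ^ n) ++ [x / 5 ^ n] := by
  induction n with
  | zero =>
    intro x hx0 hx1
    have h5 : x % 5 = x := Int.emod_eq_of_lt hx0 (by simpa using hx1)
    simp [toDigits5, h5]
  | succ k ih =>
    intro x hx0 hx1
    have hq0 : 0 ≤ x / 5 := Int.ediv_nonneg hx0 (by norm_num)
    have hq1 : x / 5 < 5 ^ (k + 1) := by
      rw [Int.ediv_lt_iff_lt_mul (by norm_num : (0:Int) < 5)]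
      calc x < 5 ^ (k + 2) := hx1
      _ = 5 ^ (k + 1) * 5 := by ring
    have lhs : toDigits5 (k + 2) x
        = x % 5 :: (toDigits5 k (x / 5 % 5 ^ k) ++ [x / 5 / 5 ^ k]) := by
      show (PySem.Int.mod x 5 :: toDigits5 (k + 1) (PySem.Int.floordiv x 5)) = _
      rw [PySem.Int.mod_eq_emod_of_pos (by norm_num : (0:Int) < 5),
        PySem.Int.floordiv_eq_ediv_of_pos (by norm_num : (0:Int) < 5),
        ih (x / 5) hq0 hq1]
    rw [lhs]
    show _ = (PySem.Int.mod (x % 5 ^ (k + 1)) 5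
        :: toDigits5 k (PySem.Int.floordiv (x % 5 ^ (k + 1)) 5)) ++ [x / 5 ^ (k + 1)]
    rw [PySem.Int.mod_eq_emod_of_pos (by norm_num : (0:Int) < 5),
      PySem.Int.floordiv_eq_ediv_of_pos (by norm_num : (0:Int) < 5),
      mod_pow_mod, mod_pow_div, div_div_pow]
    simp

-- solve_alt in scan form when the coordinates are in range (covers n = 0, where both are false)
theorem alt_scan (n : Nat) (x y : Int) (hx0 : 0 ≤ x) (hx1 : x < 5 ^ n)
    (hy0 : 0 ≤ y) (hy1 : y < 5 ^ n) :
    solve_alt (n : Int) x y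
      = scanDigits (((toDigits5 n x).reverse).zip ((toDigits5 n y).reverse)) := by
  cases n with
  | zero =>
    have : solve_alt 0 x y = false := by
      unfold solve_alt
      rw [if_pos (Or.inl (le_refl 0))]
    simp [this, toDigits5, scanDigits]
  | succ k =>
    unfold solve_alt
    rw [if_neg, Int.toNat_natCast]
    rintro (h | h | h | h | h)
    · omega
    · omega
    · omega
    · rw [Int.toNat_natCast] at h; omega
    · rw [Int.toNat_natCast] at h; omega

theorem main_equiv : ∀ (n : Nat) (x y : Int), solve (n : Int) x y = solve_alt (n : Int) x y := by
  intro n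
  induction n with
  | zero =>
    intro x y
    rw [solve, solve_alt]
    simp
  | succ k ih =>
    intro x y
    have hp : (0:Int) < 5 ^ k := by positivity
    have e1 : ((k + 1 : Nat) : Int) - 1 = (k : Int) := by push_cast; ring
    rw [solve, e1, pyIntPow5_natCast]
    rw [if_neg (by omega : ¬ ((k + 1 : Nat) : Int) = 0), dif_neg (by positivity : ¬ (5:Int) ^ k = 0)]
    simp only [PySem.Int.floordiv_eq_ediv_of_pos hp, PySem.Int.mod_eq_emod_of_pos hp]
    by_cases hx0 : x < 0
    · have ha : x / 5 ^ k < 0 := Int.ediv_neg_of_neg_of_pos hx0 hp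
      have halt : solve_alt ((k + 1 : Nat) : Int) x y = false := by
        unfold solve_alt
        rw [if_pos (Or.inr (Or.inl hx0))]
      rw [halt]
      split_ifs <;> first | rfl | omega
    · by_cases hy0 : y < 0
      · have hb : y / 5 ^ k < 0 := Int.ediv_neg_of_neg_of_pos hy0 hp
        have halt : solve_alt ((k + 1 : Nat) : Int) x y = false := by
          unfold solve_alt
          rw [if_pos (Or.inr (Or.inr (Or.inl hy0)))]
        rw [halt]
        split_ifs <;> first | rfl | omega
      · by_cases hx1 : x ≥ 5 ^ (k + 1)
        · have ha : 5 ≤ x / 5 ^ k := by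
            rw [Int.le_ediv_iff_mul_le hp]
            calc (5:Int) * 5 ^ k = 5 ^ (k + 1) := by ring
            _ ≤ x := hx1
          have halt : solve_alt ((k + 1 : Nat) : Int) x y = false := by
            unfold solve_alt
            rw [if_pos (Or.inr (Or.inr (Or.inr (Or.inl (by rw [Int.toNat_natCast]; exact hx1)))))]
          rw [halt]
          split_ifs <;> first | rfl | omega
        · by_cases hy1 : y ≥ 5 ^ (k + 1)
          · have hb : 5 ≤ y / 5 ^ k := by
              rw [Int.le_ediv_iff_mul_le hp]
              calc (5:Int) * 5 ^ k = 5 ^ (k + 1) := by ring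
              _ ≤ y := hy1
            have halt : solve_alt ((k + 1 : Nat) : Int) x y = false := by
              unfold solve_alt
              rw [if_pos (Or.inr (Or.inr (Or.inr (Or.inr (by rw [Int.toNat_natCast]; exact hy1)))))]
            rw [halt]
            split_ifs <;> first | rfl | omega
          · push_neg at hx0 hy0 hx1 hy1
            have ha0 : 0 ≤ x / 5 ^ k := Int.ediv_nonneg hx0 (le_of_lt hp)
            have ha4 : x / 5 ^ k < 5 := by
              rw [Int.ediv_lt_iff_lt_mul hp]
              calc x < 5 ^ (k + 1) := hx1
              _ = 5 * 5 ^ k := by ring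
            have hb0 : 0 ≤ y / 5 ^ k := Int.ediv_nonneg hy0 (le_of_lt hp)
            have hb4 : y / 5 ^ k < 5 := by
              rw [Int.ediv_lt_iff_lt_mul hp]
              calc y < 5 ^ (k + 1) := hy1
              _ = 5 * 5 ^ k := by ring
            rw [alt_scan (k + 1) x y hx0 hx1 hy0 hy1,
              digits_decomp k x hx0 hx1, digits_decomp k y hy0 hy1]
            simp only [List.reverse_append, List.reverse_cons, List.reverse_nil,
              List.nil_append, List.singleton_append, List.zip_cons_cons, scanDigits]
            have hrec : scanDigits (((toDigits5 k (x % 5 ^ k)).reverse).zip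
                ((toDigits5 k (y % 5 ^ k)).reverse)) = solve (k : Int) (x % 5 ^ k) (y % 5 ^ k) := by
              rw [ih (x % 5 ^ k) (y % 5 ^ k)]
              exact (alt_scan k _ _ (Int.emod_nonneg x (ne_of_gt hp)) (Int.emod_lt_of_pos x hp)
                (Int.emod_nonneg y (ne_of_gt hp)) (Int.emod_lt_of_pos y hp)).symm
            rw [hrec]
            set a := x / 5 ^ k with hadef
            set b := y / 5 ^ k with hbdef
            clear_value a b
            interval_cases a <;> interval_cases b <;> norm_num

-- ===== VERDICT =====
theorem solve_spec : Claim_equal_solve := by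
  intro m x y _ hpre
  unfold Spec_solve
  unfold Pre_solve at hpre
  have hm : m = (m.toNat : Int) := by omega
  rw [hm]
  exact main_equiv m.toNat x y
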